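-- pv_equiv track=rewrite | github.com/OxQuasar/nous-memories | iching/relations/five_orbits.py | type_distribution
-- ===== SOURCE A (Python) =====
-- from collections import Counter, defaultdict
--
-- def complement(x, n=3):
--     return x ^ ((1 << n) - 1)
--
-- def get_complement_pairs():
--     """Complement pairs in F₂³. Returns list of (rep, partner) with rep < partner."""
--     pairs = []
--     seen = set()
--     for x in range(8):
--         if x in seen: continue
--         cx = complement(x)
--         seen.add(x); seen.add(cx)
--         pairs.append((min(x, cx), max(x, cx)))
--     return sorted(pairs)
--
-- def type_distribution(s, p=5):
--     """For each complement pair, what 'type' is it?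
--     Type 0: both map to 0 (pair maps to {0,0})
--     Type 1: maps to a unique negation pair
--     Type 2: shares a negation pair with another pair
--
--     Actually, simpler: the type is determined by the value of f(rep).
--     - f(rep) = 0: pair maps to {0, 0}
--     - f(rep) ≠ 0: pair maps to {v, -v} for some negation pair
--
--     The 'type distribution' is which negation pairs share fibers.
--     """
--     pairs = get_complement_pairs()
--     neg_pair_assignment = {}
--     for i, (rep, partner) in enumerate(pairs):
--         v = s[rep]
--         if v == 0:
--             neg_pair_assignment[i] = 'zero'
--         else:
--             # Which negation pair? {v, p-v}
--             slot = min(v, p - v)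
--             neg_pair_assignment[i] = slot
--
--     # Count how many domain pairs map to each slot
--     slot_counts = Counter(neg_pair_assignment.values())
--
--     # Type: 0 if maps to zero, 1 if unique slot, 2 if shared slot
--     types = {}
--     for i, slot in neg_pair_assignment.items():
--         if slot == 'zero':
--             types[i] = 0
--         elif slot_counts[slot] == 1:
--             types[i] = 1
--         else:
--             types[i] = 2
--
--     return tuple(types[i] for i in range(len(pairs)))
-- ===== SOURCE B (Python) =====
-- def type_distribution(s, p=5):
--     # Complement-pair representatives in F_2^3 are indices 0..3. Two nonzero
--     # values v, w land in the same negation fiber {v, p-v} iff v == w or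
--     # v + w == p, so no canonical slot (min(v, p-v)) is ever computed:
--     # each index is classified by a direct pairwise fiber test on raw values.
--     out = []
--     for i in range(4):
--         v = s[i]
--         if v == 0:
--             out.append(0)
--         elif any(j != i and s[j] != 0 and (s[j] == v or s[j] + v == p)
--                  for j in range(4)):
--             out.append(2)
--         else:
--             out.append(1)
--     return tuple(out)
-- ===== Notes on version B (the rewrite author's own statement) =====
-- stated objective: alternative
-- what changed: B never computes A's canonical slot min(v,p-v), fiber dict or Counter at all: it classifies each of the four fixed pair representatives by a direct pairwise fiber test on the raw values, using the algebraic fact that nonzero v,w lie in the same negation fiber iff v==w or v+w==p.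
import Mathlib
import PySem

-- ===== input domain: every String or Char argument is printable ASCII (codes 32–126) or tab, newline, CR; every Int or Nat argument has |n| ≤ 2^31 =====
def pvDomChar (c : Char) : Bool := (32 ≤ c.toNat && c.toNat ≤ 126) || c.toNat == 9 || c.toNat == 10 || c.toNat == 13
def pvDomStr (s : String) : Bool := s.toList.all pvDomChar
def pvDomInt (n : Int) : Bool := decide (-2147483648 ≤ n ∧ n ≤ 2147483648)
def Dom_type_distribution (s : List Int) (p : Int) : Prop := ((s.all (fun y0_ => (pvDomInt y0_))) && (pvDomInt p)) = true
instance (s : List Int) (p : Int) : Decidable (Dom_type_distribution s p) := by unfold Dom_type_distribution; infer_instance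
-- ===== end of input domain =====

-- B drops A's canonical-slot computation (min(v,p-v)), fiber dict and Counter entirely and
-- classifies each of the four fixed pair representatives by a direct pairwise fiber test on the
-- raw values (same negation fiber iff w = v or w + v = p); objective: alternative algorithm,
-- same constant cost on this fixed-size input.

-- ===== PORT A =====
def pyComplement (x n : Int) : Int := PySem.Int.bxor x ((1 <<< n.toNat) - 1)

def get_complement_pairs : List (Int × Int) :=
  let st := (PySem.List.pyRange 0 8 1).foldl
    (fun (st : List (Int × Int) × PySem.Set Int) x =>
      if PySem.Set.contains st.2 x then st
      else
        let cx := pyComplement x 3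
        let seen := PySem.Set.add (PySem.Set.add st.2 x) cx
        (st.1 ++ [(min x cx, max x cx)], seen))
    ([], PySem.Set.empty)
  PySem.List.sorted2 st.1 (fun q => q.1) (fun q => q.2) false

-- Python's 'zero' sentinel is modelled as `none`, a numeric slot as `some slot`.
-- s[rep] is in range under Pre_ (4 ≤ s.length), so the `.getD 0` is unreachable there;
-- likewise every key of `types` is present, so the final `.getD 0` is unreachable.
def type_distribution (s : List Int) (p : Int) : List Int :=
  let pairs := get_complement_pairs
  let npa : PySem.Dict Int (Option Int) :=
    (PySem.List.enumerate pairs).foldl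
      (fun d ip =>
        let v := (PySem.List.pyGet? s ip.2.1).getD 0
        if v = 0 then d.insert ip.1 none
        else d.insert ip.1 (some (min v (p - v))))
      PySem.Dict.empty
  let slotCounts := PySem.Dict.counter npa.values
  let types : PySem.Dict Int Int :=
    npa.items.foldl
      (fun tys is =>
        match is.2 with
        | none => tys.insert is.1 0
        | some _ => if slotCounts.getD is.2 0 = 1 then tys.insert is.1 1 else tys.insert is.1 2)
      PySem.Dict.empty
  (PySem.List.pyRange 0 pairs.length 1).map (fun i => (types.get? i).getD 0)

-- ===== PORT B =====
def type_distribution_alt (s : List Int) (p : Int) : List Int :=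
  (List.range 4).foldl
    (fun out i =>
      let v := (PySem.List.pyGet? s (i : Int)).getD 0
      if v = 0 then out ++ [0]
      else if (List.range 4).any (fun j =>
          let w := (PySem.List.pyGet? s (j : Int)).getD 0
          decide (j ≠ i ∧ w ≠ 0 ∧ (w = v ∨ w + v = p)))
      then out ++ [2] else out ++ [1])
    []

-- ===== PRECONDITION & SPEC =====
-- A indexes s[0], …, s[3]; on lists shorter than 4 it raises IndexError, hence those are excluded.
def Pre_type_distribution (s : List Int) (p : Int) : Prop := 4 ≤ s.length
instance (s : List Int) (p : Int) : Decidable (Pre_type_distribution s p) := by unfold Pre_type_distribution; infer_instance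
def pvWitness_type_distribution : List Int × Int := ([1, 2, 3, 4], 5)
def Spec_type_distribution (s : List Int) (p : Int) (out : List Int) : Prop := out = type_distribution_alt s p
instance (s : List Int) (p : Int) (out : List Int) : Decidable (Spec_type_distribution s p out) := by unfold Spec_type_distribution; infer_instance

-- ===== CLAIM (what is proved, stated in full; the proofs are below) =====
def Claim_equal_type_distribution : Prop := ∀ (s : List Int) (p : Int), Dom_type_distribution s p → Pre_type_distribution s p → Spec_type_distribution s p (type_distribution s p)

-- ===== LEMMAS AND PROOFS =====

-- Proof-only intermediate formulation: the canonical-slot list with a nested duplicate scan.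
-- A is first reduced to this form (main_eq), which is then bridged to B (scan_eq_alt).
def scanB (s : List Int) (p : Int) : List Int :=
  let slots : List (Option Int) := (List.range 4).map
    (fun i =>
      let v := (PySem.List.pyGet? s (i : Int)).getD 0
      if v = 0 then none else some (min v (p - v)))
  (List.range 4).foldl
    (fun out i =>
      match slots.getD i none with
      | none => out ++ [0]
      | some m =>
        let shared := (List.range 4).foldl
          (fun sh j => if j ≠ i ∧ slots.getD j none = some m then true else sh) false
        out ++ [if shared then 2 else 1])
    []

theorem pairs_eq : get_complement_pairs = [(0, 7), (1, 6), (2, 5), (3, 4)] := by decide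

theorem ins_ite {ν : Type} (d : PySem.Dict Int ν) (i : Int) (P : Prop) [Decidable P] (x y : ν) :
    (if P then d.insert i x else d.insert i y) = d.insert i (if P then x else y) := by
  split_ifs <;> rfl

theorem ins_match (tys : PySem.Dict Int Int) (i : Int) (o : Option Int) (x y : Int) :
    (match o with | none => tys.insert i x | some _ => tys.insert i y) =
      tys.insert i (match o with | none => x | some _ => y) := by
  cases o <;> rfl

-- The algebraic heart of B: two values lie in the same negation fiber
-- (equal canonical slots min(·, p−·)) iff they are equal or sum to p.
theorem fiber_eq (v w p : Int) : min v (p - v) = min w (p - w) ↔ (v = w ∨ v + w = p) := by omega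

-- A's count-is-one test agrees with the duplicate scan, abstracted over the four fibre slots.
set_option maxHeartbeats 1000000 in
theorem slots_eq (s0 s1 s2 s3 : Option Int) :
    [(match s0 with
      | none => 0
      | some _ => if List.count s0 [s1, s2, s3] = 0 then 1 else 2 : Int),
     (match s1 with
      | none => 0
      | some _ => if List.count s1 [s0, s1, s2, s3] = 1 then 1 else 2),
     (match s2 with
      | none => 0
      | some _ => if List.count s2 [s0, s1, s2, s3] = 1 then 1 else 2),
     (match s3 with
      | none => 0
      | some _ => if List.count s3 [s0, s1, s2, s3] = 1 then 1 else 2)] =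
    (match s3 with
    | none =>
      (match s2 with
        | none =>
          (match s1 with
            | none =>
              (match s0 with
                | none => [(0 : Int)]
                | some m => [if s3 = some m ∨ s2 = some m ∨ s1 = some m then 2 else 1]) ++
                [0]
            | some m =>
              (match s0 with
                | none => [0]
                | some m => [if s3 = some m ∨ s2 = some m ∨ s1 = some m then 2 else 1]) ++
                [if s3 = some m ∨ s2 = some m ∨ s0 = some m then 2 else 1]) ++
            [0]
        | some m =>
          (match s1 with
            | none =>
              (match s0 with
                | none => [0]
                | some m => [if s3 = some m ∨ s2 = some m ∨ s1 = some m then 2 else 1]) ++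
                [0]
            | some m =>
              (match s0 with
                | none => [0]
                | some m => [if s3 = some m ∨ s2 = some m ∨ s1 = some m then 2 else 1]) ++
                [if s3 = some m ∨ s2 = some m ∨ s0 = some m then 2 else 1]) ++
            [if s3 = some m ∨ s1 = some m ∨ s0 = some m then 2 else 1]) ++
        [0]
    | some m =>
      (match s2 with
        | none =>
          (match s1 with
            | none =>
              (match s0 with
                | none => [0]
                | some m => [if s3 = some m ∨ s2 = some m ∨ s1 = some m then 2 else 1]) ++
                [0]
            | some m =>
              (match s0 with
                | none => [0]
                | some m => [if s3 = some m ∨ s2 = some m ∨ s1 = some m then 2 else 1]) ++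
                [if s3 = some m ∨ s2 = some m ∨ s0 = some m then 2 else 1]) ++
            [0]
        | some m =>
          (match s1 with
            | none =>
              (match s0 with
                | none => [0]
                | some m => [if s3 = some m ∨ s2 = some m ∨ s1 = some m then 2 else 1]) ++
                [0]
            | some m =>
              (match s0 with
                | none => [0]
                | some m => [if s3 = some m ∨ s2 = some m ∨ s1 = some m then 2 else 1]) ++
                [if s3 = some m ∨ s2 = some m ∨ s0 = some m then 2 else 1]) ++
            [if s3 = some m ∨ s1 = some m ∨ s0 = some m then 2 else 1]) ++
        [if s2 = some m ∨ s1 = some m ∨ s0 = some m then 2 else 1]) := by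
  cases s0 <;> cases s1 <;> cases s2 <;> cases s3 <;>
    simp only [List.count_cons, List.count_nil, beq_iff_eq, Option.some.injEq,
      List.cons_append, List.nil_append, reduceCtorEq] <;>
    norm_num <;> (repeat' apply And.intro) <;> split_ifs <;> first | rfl | omega

set_option maxHeartbeats 1000000 in
theorem main_eq (a b c d : Int) (t : List Int) (p : Int) :
    type_distribution (a :: b :: c :: d :: t) p = scanB (a :: b :: c :: d :: t) p := by
  have h0 : PySem.List.pyGet? (a::b::c::d::t) (0:Int) = some a := by simp [pysem]
  have h1 : PySem.List.pyGet? (a::b::c::d::t) (1:Int) = some b := by simp [pysem]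
  have h2 : PySem.List.pyGet? (a::b::c::d::t) (2:Int) = some c := by simp [pysem]
  have h3 : PySem.List.pyGet? (a::b::c::d::t) (3:Int) = some d := by simp [pysem]
  have hpr : PySem.List.pyRange 0 4 1 = [0, 1, 2, 3] := by decide
  have hR : List.range 4 = [0, 1, 2, 3] := by decide
  norm_num [type_distribution, scanB, pairs_eq, hpr, hR,
    PySem.List.enumerate_cons, PySem.List.enumerate_nil, h0, h1, h2, h3, List.getD]
  simp only [ins_ite, ins_match]
  generalize hs0 : (if a = 0 then (none : Option Int) else some (min a (p - a))) = s0
  generalize hs1 : (if b = 0 then (none : Option Int) else some (min b (p - b))) = s1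
  generalize hs2 : (if c = 0 then (none : Option Int) else some (min c (p - c))) = s2
  generalize hs3 : (if d = 0 then (none : Option Int) else some (min d (p - d))) = s3
  simp only [PySem.Dict.insert, PySem.Dict.empty, PySem.Dict.contains, PySem.Dict.items,
    PySem.Dict.values, PySem.Dict.get?, List.any_cons, List.any_nil, List.map_cons,
    List.map_nil, List.foldl_cons, List.foldl_nil, List.find?]
  norm_num
  have c0 : ∀ m : Int, (¬ a = 0 ∧ min a (p - a) = m) ↔ s0 = some m := by
    intro m; rw [← hs0]; split_ifs with h <;> simp [h]
  have c1 : ∀ m : Int, (¬ b = 0 ∧ min b (p - b) = m) ↔ s1 = some m := by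
    intro m; rw [← hs1]; split_ifs with h <;> simp [h]
  have c2 : ∀ m : Int, (¬ c = 0 ∧ min c (p - c) = m) ↔ s2 = some m := by
    intro m; rw [← hs2]; split_ifs with h <;> simp [h]
  have c3 : ∀ m : Int, (¬ d = 0 ∧ min d (p - d) = m) ↔ s3 = some m := by
    intro m; rw [← hs3]; split_ifs with h <;> simp [h]
  simp only [c0, c1, c2, c3]
  exact slots_eq s0 s1 s2 s3

theorem match_ite {b : Type} (c : Prop) [Decidable c] (e : Int) (A : b) (B : Int -> b) :
    (match (if c then none else some e) with | none => A | some m => B m) = if c then A else B e := by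
  split_ifs <;> rfl

theorem ite_single {a : Type} (c : Prop) [Decidable c] (u v : a) :
    (if c then [u] else [v]) = [if c then u else v] := by
  split_ifs <;> rfl

theorem ite_append {a : Type} (c : Prop) [Decidable c] (x u v : List a) :
    (if c then x ++ u else x ++ v) = x ++ (if c then u else v) := by
  split_ifs <;> rfl

theorem scan_eq_alt (a b c d : Int) (t : List Int) (p : Int) :
    scanB (a :: b :: c :: d :: t) p = type_distribution_alt (a :: b :: c :: d :: t) p := by
  have h0 : PySem.List.pyGet? (a::b::c::d::t) (0:Int) = some a := by simp [pysem]
  have h1 : PySem.List.pyGet? (a::b::c::d::t) (1:Int) = some b := by simp [pysem]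
  have h2 : PySem.List.pyGet? (a::b::c::d::t) (2:Int) = some c := by simp [pysem]
  have h3 : PySem.List.pyGet? (a::b::c::d::t) (3:Int) = some d := by simp [pysem]
  have hR : List.range 4 = [0, 1, 2, 3] := by decide
  norm_num [scanB, type_distribution_alt, hR, h0, h1, h2, h3, List.getD]
  simp only [match_ite, fiber_eq, ite_single, ite_append, List.append_assoc]
  simp only [or_comm, or_left_comm]

-- ===== VERDICT (by name: the statement is the Claim_ definition above) =====
theorem type_distribution_spec : Claim_equal_type_distribution := by
  intro s p _ hpre
  unfold Spec_type_distribution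
  match s, hpre with
  | a :: b :: c :: d :: t, _ => exact (main_eq a b c d t p).trans (scan_eq_alt a b c d t p)
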